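-- pv_equiv track=rewrite | github.com/Erkadaflown/mustgit | sem6/sem6_2.py | count_possible_vaccines
-- ===== SOURCE A (Python) =====
-- def count_possible_vaccines(coronavirus_representation):
--
--     digit_count = {}
--
--     possible_vaccines = 0
--
--     for digit in coronavirus_representation:
--         if digit in digit_count:
--             digit_count[digit] += 1
--         else:
--             digit_count[digit] = 1
--
--     for count in digit_count.values():
--         possible_vaccines += count * (count - 1) // 2
--
--     return possible_vaccines
-- ===== SOURCE B (Python) =====
-- def count_possible_vaccines(coronavirus_representation):
--     seen = {}
--     possible_vaccines = 0
--     for digit in coronavirus_representation: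
--         prior = seen.get(digit, 0)
--         possible_vaccines += prior
--         seen[digit] = prior + 1
--     return possible_vaccines
-- ===== Notes on version B (the rewrite author's own statement) =====
-- stated objective: alternative
-- what changed: Single fused pass: each element adds the number of prior equal elements to the accumulator directly, instead of building a full frequency table first and then a second pass summing count*(count-1)//2 over its values.
import Mathlib
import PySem

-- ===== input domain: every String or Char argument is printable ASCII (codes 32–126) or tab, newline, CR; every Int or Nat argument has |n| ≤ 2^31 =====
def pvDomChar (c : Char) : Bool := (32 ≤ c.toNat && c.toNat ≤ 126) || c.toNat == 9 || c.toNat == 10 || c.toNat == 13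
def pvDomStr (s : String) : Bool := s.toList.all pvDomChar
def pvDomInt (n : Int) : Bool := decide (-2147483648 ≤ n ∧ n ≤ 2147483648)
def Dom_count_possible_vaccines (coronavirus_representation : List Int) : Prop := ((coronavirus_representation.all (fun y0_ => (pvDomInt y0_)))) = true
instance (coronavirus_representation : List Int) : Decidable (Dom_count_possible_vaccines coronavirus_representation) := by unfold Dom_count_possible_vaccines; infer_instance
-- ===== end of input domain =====

-- B fuses pair-accumulation into the counting pass (each element contributes the
-- number of prior equal elements), instead of A's second pass summing c*(c-1)//2
-- over the finished frequency table; objective: alternative (same cost, one pass).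

-- ===== PORT A =====
def count_possible_vaccines (coronavirus_representation : List Int) : Int :=
  let digit_count : PySem.Dict Int Int :=
    coronavirus_representation.foldl
      (fun d digit =>
        if d.contains digit then d.insert digit (d.getD digit 0 + 1)
        else d.insert digit 1)
      PySem.Dict.empty
  digit_count.values.foldl
    (fun possible_vaccines count =>
      possible_vaccines + PySem.Int.floordiv (count * (count - 1)) 2)
    0

-- ===== PORT B =====
def count_possible_vaccines_alt (coronavirus_representation : List Int) : Int :=
  (coronavirus_representation.foldl
    (fun (st : Int × PySem.Dict Int Int) digit =>
      let prior := st.2.getD digit 0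
      (st.1 + prior, st.2.insert digit (prior + 1)))
    (0, PySem.Dict.empty)).1

-- ===== PRECONDITION & SPEC =====
def Spec_count_possible_vaccines (coronavirus_representation : List Int) (out : Int) : Prop := out = count_possible_vaccines_alt coronavirus_representation
instance (coronavirus_representation : List Int) (out : Int) : Decidable (Spec_count_possible_vaccines coronavirus_representation out) := by unfold Spec_count_possible_vaccines; infer_instance

-- ===== CLAIM (what is proved, stated in full; the proofs are below) =====
def Claim_equal_count_possible_vaccines : Prop := ∀ (coronavirus_representation : List Int), Dom_count_possible_vaccines coronavirus_representation → Spec_count_possible_vaccines coronavirus_representation (count_possible_vaccines coronavirus_representation)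

-- ===== LEMMAS AND PROOFS =====

-- number of unordered equal pairs, via the distinct elements of xs
def pvG (c : Int) : Int := PySem.Int.floordiv (c * (c - 1)) 2

def pvPairs (xs : List Int) : Int :=
  ((PySem.Set.ofList xs).map (fun k => pvG ((xs.count k : Int)))).sum

theorem pvG_succ (c : Int) : pvG (c + 1) = pvG c + c := by
  unfold pvG
  rw [PySem.Int.floordiv_eq_ediv_of_pos (by norm_num),
      PySem.Int.floordiv_eq_ediv_of_pos (by norm_num)]
  rw [show (c + 1) * (c + 1 - 1) = c * (c - 1) + c * 2 by ring]
  rw [Int.add_mul_ediv_right _ _ (by norm_num : (2:Int) ≠ 0)]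

-- replace f by f' at every element except x; the sum changes by f x - f' x
theorem pv_sum_map_single {l : List Int} {x : Int} (hn : l.Nodup) (hx : x ∈ l)
    (f f' : Int → Int) (h : ∀ k ∈ l, k ≠ x → f k = f' k) :
    (l.map f).sum = (l.map f').sum + (f x - f' x) := by
  induction l with
  | nil => cases hx
  | cons a l ih =>
    rcases List.mem_cons.mp hx with rfl | hx'
    · have hnot : x ∉ l := (List.nodup_cons.mp hn).1
      have hmc : l.map f = l.map f' := List.map_congr_left (fun k hk =>
        h k (List.mem_cons_of_mem _ hk) (fun he => hnot (he ▸ hk)))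
      simp only [List.map_cons, List.sum_cons, hmc]
      ring
    · have hfa : f a = f' a := h a List.mem_cons_self
        (fun he => absurd (he ▸ hx') (List.nodup_cons.mp hn).1)
      have hih := ih (List.nodup_cons.mp hn).2 hx'
        (fun k hk => h k (List.mem_cons_of_mem _ hk))
      simp only [List.map_cons, List.sum_cons, hfa, hih]
      ring

theorem pvPairs_append (p : List Int) (x : Int) :
    pvPairs (p ++ [x]) = pvPairs p + (p.count x : Int) := by
  unfold pvPairs
  have hofl : PySem.Set.ofList (p ++ [x]) = PySem.Set.add (PySem.Set.ofList p) x := by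
    rw [PySem.Set.ofList_eq_foldl, PySem.Set.ofList_eq_foldl, List.foldl_append]
    rfl
  have hcnt : ∀ k : Int, (p ++ [x]).count k = p.count k + (if x = k then 1 else 0) := by
    intro k
    by_cases h : x = k
    · subst h; simp [List.count_append]
    · have hk : ¬ k = x := fun he => h he.symm
      simp [List.count_append, h]
  by_cases hmem : x ∈ PySem.Set.ofList p
  · have hadd : PySem.Set.add (PySem.Set.ofList p) x = PySem.Set.ofList p := by
      simp [PySem.Set.add, PySem.Set.contains, hmem]
    rw [hofl, hadd]
    have hnd : (PySem.Set.ofList p).Nodup := PySem.Set.nodup_ofList p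
    have hone := pv_sum_map_single hnd hmem
      (fun k => pvG (((p ++ [x]).count k : Int)))
      (fun k => pvG ((p.count k : Int)))
      (fun k _ hk => by
        have hxk : x ≠ k := Ne.symm hk
        simp [hcnt k, hxk])
    rw [hone]
    have hx1 : (((p ++ [x]).count x : Nat) : Int) = ((p.count x : Nat) : Int) + 1 := by
      simp [hcnt x]
    simp only [hx1, pvG_succ]
    ring
  · have hadd : PySem.Set.add (PySem.Set.ofList p) x = PySem.Set.ofList p ++ [x] := by
      simp [PySem.Set.add, PySem.Set.contains, hmem]
    rw [hofl, hadd]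
    have hxp : x ∉ p := fun h => hmem ((PySem.Set.mem_ofList p x).mpr h)
    have hmap : (PySem.Set.ofList p).map (fun k => pvG (((p ++ [x]).count k : Int)))
        = (PySem.Set.ofList p).map (fun k => pvG ((p.count k : Int))) := by
      refine List.map_congr_left (fun k hk => ?_)
      have hxk : x ≠ k := fun he => hmem (he ▸ hk)
      simp [hcnt k, hxk]
    have hcx : (p ++ [x]).count x = 1 := by
      simp [hcnt x, List.count_eq_zero_of_not_mem hxp]
    have hpcx : p.count x = 0 := List.count_eq_zero_of_not_mem hxp
    rw [List.map_append, List.sum_append, hmap]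
    simp only [List.map_cons, List.map_nil, List.sum_cons, List.sum_nil, hcx, hpcx]
    norm_num [pvG, PySem.Int.floordiv]

-- A's first loop is the standard counter loop
theorem pvA_step (d : PySem.Dict Int Int) (x : Int) :
    (if d.contains x then d.insert x (d.getD x 0 + 1) else d.insert x 1)
      = d.insert x (d.getD x 0 + 1) := by
  by_cases h : d.contains x = true
  · simp [h]
  · have hf : d.contains x = false := by simpa using h
    rw [PySem.Dict.getD_of_not_contains d 0 hf]
    simp [hf]

theorem pvA_eq_pairs (xs : List Int) : count_possible_vaccines xs = pvPairs xs := by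
  unfold count_possible_vaccines
  simp only [pvA_step]
  rw [PySem.Dict.foldl_insert_getD_add_one_eq_counter]
  have hv : (PySem.Dict.counter xs).values
      = (PySem.Set.ofList xs).map (fun k => (xs.count k : Int)) := by
    show (PySem.Dict.counter xs).items.map Prod.snd = _
    rw [PySem.Dict.items_counter, List.map_map]
    rfl
  rw [hv]
  show ((PySem.Set.ofList xs).map (fun k => (xs.count k : Int))).foldl
      (fun acc c => acc + pvG c) 0 = pvPairs xs
  rw [PySem.List.foldl_add (g := pvG), List.map_map]
  unfold pvPairs
  simp [Function.comp_def]

-- B's loop invariant: the state over a processed prefix p is (pvPairs p, counter p)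
theorem pvB_inv (l p : List Int) :
    l.foldl
      (fun (st : Int × PySem.Dict Int Int) digit =>
        let prior := st.2.getD digit 0
        (st.1 + prior, st.2.insert digit (prior + 1)))
      (pvPairs p, PySem.Dict.counter p)
    = (pvPairs (p ++ l), PySem.Dict.counter (p ++ l)) := by
  induction l generalizing p with
  | nil => simp
  | cons x l ih =>
    rw [List.foldl_cons]
    show List.foldl _
        (pvPairs p + (PySem.Dict.counter p).getD x 0,
         (PySem.Dict.counter p).insert x ((PySem.Dict.counter p).getD x 0 + 1)) l
      = (pvPairs (p ++ x :: l), PySem.Dict.counter (p ++ x :: l))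
    have hfst : pvPairs p + (PySem.Dict.counter p).getD x 0 = pvPairs (p ++ [x]) := by
      rw [PySem.Dict.getD_counter, pvPairs_append]
    have hsnd : (PySem.Dict.counter p).insert x ((PySem.Dict.counter p).getD x 0 + 1)
        = PySem.Dict.counter (p ++ [x]) := by
      rw [PySem.Dict.counter_append_singleton]
      rfl
    rw [hfst, hsnd, ih (p ++ [x])]
    simp

theorem pvB_eq_pairs (xs : List Int) : count_possible_vaccines_alt xs = pvPairs xs := by
  unfold count_possible_vaccines_alt
  have h := pvB_inv xs []
  simp only [List.nil_append] at h
  rw [show ((0 : Int), (PySem.Dict.empty : PySem.Dict Int Int))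
        = (pvPairs [], PySem.Dict.counter []) from rfl, h]

-- ===== VERDICT (by name: the statement is the Claim_ definition above) =====
theorem count_possible_vaccines_spec : Claim_equal_count_possible_vaccines := by
  intro xs _
  unfold Spec_count_possible_vaccines
  rw [pvA_eq_pairs, pvB_eq_pairs]
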